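-- pv_equiv track=rewrite | github.com/rehoboam-karl/crossfit-health-os | backend/app/core/i18n.py | normalize_locale
-- ===== SOURCE A (Python) =====
-- from typing import Any, Dict, Optional
--
-- SUPPORTED_LOCALES = ("pt-BR", "en")
--
-- def normalize_locale(raw: Optional[str]) -> Optional[str]:
--     """Map an Accept-Language tag (e.g. ``pt``, ``pt_BR``, ``en-US``) to a supported locale."""
--     if not raw:
--         return None
--     raw = raw.strip().replace("_", "-")
--     # Exact match wins.
--     for sup in SUPPORTED_LOCALES:
--         if raw.lower() == sup.lower():
--             return sup
--     # Prefix match (e.g. "pt" → "pt-BR", "en-US" → "en").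
--     primary = raw.split("-", 1)[0].lower()
--     for sup in SUPPORTED_LOCALES:
--         if sup.split("-", 1)[0].lower() == primary:
--             return sup
--     return None
-- ===== SOURCE B (Python) =====
-- from typing import Optional
--
-- SUPPORTED_LOCALES = ("pt-BR", "en")
--
-- # Static index: primary subtag -> canonical supported locale.
-- _PRIMARY_TO_LOCALE = {"pt": "pt-BR", "en": "en"}
--
--
-- def normalize_locale(raw: Optional[str]) -> Optional[str]:
--     """Map an Accept-Language tag (e.g. ``pt``, ``pt_BR``, ``en-US``) to a supported locale."""
--     if not raw:
--         return None
--     tag = raw.strip().replace("_", "-")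
--     primary = tag.split("-", 1)[0].lower()
--     return _PRIMARY_TO_LOCALE.get(primary)
-- ===== Notes on version B (the rewrite author's own statement) =====
-- stated objective: simpler
-- what changed: B replaces A's two linear scans over SUPPORTED_LOCALES (an exact-match pass, redundant because the two locales have distinct primary subtags, then a prefix-match pass) with a single lookup of the primary subtag in a static dict.
import Mathlib
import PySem

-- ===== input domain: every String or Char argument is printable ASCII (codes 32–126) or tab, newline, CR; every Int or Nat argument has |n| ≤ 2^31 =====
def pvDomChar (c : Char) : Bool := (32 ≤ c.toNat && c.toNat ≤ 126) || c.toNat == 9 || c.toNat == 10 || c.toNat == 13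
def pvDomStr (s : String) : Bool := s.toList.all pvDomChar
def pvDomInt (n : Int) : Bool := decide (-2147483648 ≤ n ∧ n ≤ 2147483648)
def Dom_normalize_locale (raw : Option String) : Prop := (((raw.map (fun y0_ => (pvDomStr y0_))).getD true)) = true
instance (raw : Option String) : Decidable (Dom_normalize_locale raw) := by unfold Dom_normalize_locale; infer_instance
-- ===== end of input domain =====

-- B replaces A's two scans over SUPPORTED_LOCALES (exact-match pass, then prefix-match pass)
-- with a single lookup of the primary subtag in a static dict; same return value everywhere.

-- ===== PORT A =====
def pvSupportedLocales : List String := ["pt-BR", "en"]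

-- x.split("-", 1)[0].lower() — str.split always returns a nonempty list, so the [0] is total
-- and headD is exact here.
def pvPrimary (s : String) : String :=
  PySem.Str.lower (((PySem.Str.splitMax? s "-" 1).getD []).headD "")

def normalize_locale (raw : Option String) : Option String :=
  match raw with
  | none => none
  | some s =>
    if s = "" then none
    else
      let r := PySem.Str.replace (PySem.Str.strip s) "_" "-"
      -- Exact match wins.
      match pvSupportedLocales.find? (fun sup => PySem.Str.lower r == PySem.Str.lower sup) with
      | some sup => some sup
      | none =>
        -- Prefix match.
        let primary := pvPrimary r
        match pvSupportedLocales.find? (fun sup => pvPrimary sup == primary) with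
        | some sup => some sup
        | none => none

-- ===== PORT B =====
def pvPrimaryToLocale : PySem.Dict String String := ⟨[("pt", "pt-BR"), ("en", "en")]⟩

def normalize_locale_alt (raw : Option String) : Option String :=
  match raw with
  | none => none
  | some s =>
    if s = "" then none
    else
      let tag := PySem.Str.replace (PySem.Str.strip s) "_" "-"
      pvPrimaryToLocale.get? (pvPrimary tag)

-- ===== PRECONDITION & SPEC =====
def Spec_normalize_locale (raw : Option String) (out : Option String) : Prop := out = normalize_locale_alt raw
instance (raw : Option String) (out : Option String) : Decidable (Spec_normalize_locale raw out) := by unfold Spec_normalize_locale; infer_instance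

-- ===== CLAIM (what is proved, stated in full; the proofs are below) =====
def Claim_equal_normalize_locale : Prop := ∀ (raw : Option String), Dom_normalize_locale raw → Spec_normalize_locale raw (normalize_locale raw)

-- ===== LEMMAS AND PROOFS =====

-- lowerChar never creates or destroys a '-'
theorem pvLowerChar_eq_dash_iff (c : Char) : PySem.Chars.lowerChar c = '-' ↔ c = '-' := by
  unfold PySem.Chars.lowerChar PySem.Chars.isupper
  split_ifs with h
  · constructor
    · intro he
      exfalso
      simp only [Bool.and_eq_true, decide_eq_true_eq] at h
      have h1 : 65 ≤ c.toNat := h.1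
      have h2 : c.toNat ≤ 90 := h.2
      have hv : (c.toNat + 32) < 55296 := by omega
      have : (Char.ofNat (c.toNat + 32)).toNat = c.toNat + 32 := by
        simp [Char.ofNat, Char.ofNatAux, Nat.isValidChar, hv]
        omega
      have h45 : ('-' : Char).toNat = 45 := by decide
      rw [he] at this
      omega
    · intro he
      subst he
      revert h
      decide
  · exact Iff.rfl

theorem pvLower_takeWhile (cs : List Char) :
    PySem.Chars.lower (cs.takeWhile (· ≠ '-')) = (PySem.Chars.lower cs).takeWhile (· ≠ '-') := by
  induction cs with
  | nil => rfl
  | cons c rest ih =>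
    by_cases hc : c = '-'
    · subst hc
      have : PySem.Chars.lowerChar '-' = '-' := by decide
      simp [PySem.Chars.lower, List.takeWhile, this]
    · have hl : ¬ PySem.Chars.lowerChar c = '-' := fun h => hc ((pvLowerChar_eq_dash_iff c).mp h)
      simp only [PySem.Chars.lower, List.map_cons, List.takeWhile_cons] at *
      simp [hc, hl]
      simpa using ih

theorem pvGo_zero (fuel : Nat) (cs cur : List Char) (acc : List (List Char)) :
    PySem.Chars.splitOnMax.go ['-'] fuel 0 cs cur acc = ((cur.reverse ++ cs) :: acc).reverse := by
  cases fuel with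
  | zero => simp [PySem.Chars.splitOnMax.go]
  | succ n =>
    cases cs with
    | nil => simp [PySem.Chars.splitOnMax.go]
    | cons c rest => simp [PySem.Chars.splitOnMax.go]

theorem pvGo_one (fuel : Nat) (cs cur : List Char) (h : cs.length < fuel) :
    PySem.Chars.splitOnMax.go ['-'] fuel 1 cs cur [] =
      (cur.reverse ++ cs.takeWhile (· ≠ '-')) ::
        (if '-' ∈ cs then [(cs.dropWhile (· ≠ '-')).tail] else []) := by
  induction fuel generalizing cs cur with
  | zero => omega
  | succ n ih =>
    cases cs with
    | nil => simp [PySem.Chars.splitOnMax.go]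
    | cons c rest =>
      by_cases hc : c = '-'
      · subst hc
        simp only [PySem.Chars.splitOnMax.go]
        have hp : List.isPrefixOf ['-'] ('-' :: rest) = true := by
          simp [List.isPrefixOf]
        simp [hp, pvGo_zero]
      · have hp : List.isPrefixOf ['-'] (c :: rest) = false := by
          simp [List.isPrefixOf]
          exact fun h => absurd h.symm hc
        simp only [PySem.Chars.splitOnMax.go]
        have hlen : rest.length < n := by simpa using h
        simp only [hp, if_neg (by omega : ¬ (1 : Nat) = 0)]
        rw [ih rest (c :: cur) hlen]
        have hcc : ¬ '-' = c := fun h => hc h.symm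
        simp [hc, hcc]

theorem pvPrimary_toList (s : String) :
    (pvPrimary s).toList = (PySem.Chars.lower s.toList).takeWhile (· ≠ '-') := by
  unfold pvPrimary
  have hsep : ("-" : String).toList = ['-'] := by decide
  rw [PySem.Str.splitMax?, hsep]
  unfold PySem.Chars.splitMax?
  simp only [List.isEmpty_cons, if_neg Bool.false_ne_true]
  unfold PySem.Chars.splitOnMax
  rw [if_neg (by omega : ¬ (1 : Int) < 0)]
  have ht : ((1 : Int)).toNat = 1 := rfl
  rw [ht, pvGo_one (s.toList.length + 1) s.toList [] (by omega)]
  simp [PySem.Str.toList_lower, String.toList_ofList]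
  simpa using pvLower_takeWhile s.toList

theorem pvPrimary_of_lower_pt_br (r : String) (h : PySem.Str.lower r = "pt-br") :
    pvPrimary r = "pt" := by
  apply String.toList_inj.mp
  rw [pvPrimary_toList]
  have : PySem.Chars.lower r.toList = "pt-br".toList := by
    rw [← PySem.Str.toList_lower, h]
  rw [this]
  decide

theorem pvPrimary_of_lower_en (r : String) (h : PySem.Str.lower r = "en") :
    pvPrimary r = "en" := by
  apply String.toList_inj.mp
  rw [pvPrimary_toList]
  have : PySem.Chars.lower r.toList = "en".toList := by
    rw [← PySem.Str.toList_lower, h]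
  rw [this]
  decide

theorem pvCore (r : String) :
    (match pvSupportedLocales.find? (fun sup => PySem.Str.lower r == PySem.Str.lower sup) with
      | some sup => some sup
      | none =>
        match pvSupportedLocales.find? (fun sup => pvPrimary sup == pvPrimary r) with
        | some sup => some sup
        | none => none) = pvPrimaryToLocale.get? (pvPrimary r) := by
  have e1 : PySem.Str.lower "pt-BR" = "pt-br" := by decide
  have e2 : PySem.Str.lower "en" = "en" := by decide
  have e3 : pvPrimary "pt-BR" = "pt" := by decide
  have e4 : pvPrimary "en" = "en" := by decide
  simp only [pvSupportedLocales, List.find?, e1, e2, e3, e4]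
  by_cases h1 : PySem.Str.lower r = "pt-br"
  · have hp := pvPrimary_of_lower_pt_br r h1
    simp [h1, hp, PySem.Dict.get?, pvPrimaryToLocale]
  · by_cases h2 : PySem.Str.lower r = "en"
    · have hp := pvPrimary_of_lower_en r h2
      have hb1 : (PySem.Str.lower r == "pt-br") = false := by
        simp [h1]
      simp [h2, hp, PySem.Dict.get?, pvPrimaryToLocale, List.find?]
    · have hb1 : (PySem.Str.lower r == "pt-br") = false := by simp [h1]
      have hb2 : (PySem.Str.lower r == "en") = false := by simp [h2]
      simp only [hb1, hb2]
      by_cases hp1 : ("pt" : String) = pvPrimary r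
      · have b1 : (("pt" : String) == pvPrimary r) = true := by simp [hp1]
        simp [b1, PySem.Dict.get?, pvPrimaryToLocale]
      · have b1 : (("pt" : String) == pvPrimary r) = false := by simp [hp1]
        by_cases hp2 : ("en" : String) = pvPrimary r
        · have b2 : (("en" : String) == pvPrimary r) = true := by simp [hp2]
          simp [b1, b2, PySem.Dict.get?, pvPrimaryToLocale, List.find?]
        · have b2 : (("en" : String) == pvPrimary r) = false := by simp [hp2]
          simp [b1, b2, PySem.Dict.get?, pvPrimaryToLocale, List.find?]

-- ===== VERDICT (by name: the statement is the Claim_ definition above) =====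
theorem normalize_locale_spec : Claim_equal_normalize_locale := by
  intro raw _
  unfold Spec_normalize_locale
  cases raw with
  | none => rfl
  | some s =>
    rw [normalize_locale.eq_def, normalize_locale_alt.eq_def]
    dsimp only
    by_cases hs : s = ""
    · subst hs
      rw [if_pos rfl, if_pos rfl]
    · rw [if_neg hs, if_neg hs]
      exact pvCore (PySem.Str.replace (PySem.Str.strip s) "_" "-")
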